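-- pv_equiv track=rewrite | github.com/Jeongmin39/Algorithm | 프로그래머스/1/389478. 택배 상자 꺼내기/택배 상자 꺼내기.py | solution
-- ===== SOURCE A (Python) =====
-- def solution(n, w, num):
--     warehouse = []
--     stack = []
--
--     for i in range(1, n + 1):
--         stack.append(i)
--         if len(stack) == w or i == n:
--             if len(stack) < w:
--                 while len(stack) < w:
--                     stack.append(0)
--             if len(warehouse) % 2 == 0:
--                 warehouse.append(stack[:])
--             else:
--                 warehouse.append(stack[::-1])
--             stack = []
--
--     for row in range(len(warehouse)):
--         if num in warehouse[row]:
--             col = warehouse[row].index(num)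
--             break
--
--     count = 0
--     for r in range(row, len(warehouse)):
--         if warehouse[r][col] != 0:
--             count += 1
--
--     return count
-- ===== SOURCE B (Python) =====
-- def solution(n, w, num):
--     if not (1 <= num <= n):
--         raise ValueError("num is not one of the boxes 1..n")
--     row, pos = divmod(num - 1, w)
--     col = pos if row % 2 == 0 else w - 1 - pos
--     full, rem = divmod(n, w)
--     if rem == 0:
--         occ = 0
--     elif full % 2 == 0:
--         occ = 1 if col < rem else 0
--     else:
--         occ = 1 if col >= w - rem else 0
--     return full - row + occ
-- ===== Notes on version B (the rewrite author's own statement) =====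
-- stated objective: faster
-- what changed: Replaces the O(n) construction of the whole snake-ordered warehouse and the two scans over it by O(1) arithmetic: row/column of num via divmod, and the column count as (full rows below num's row) plus an occupancy test of the partial last row; B validates that num is an existing box (A fails there with an accidental NameError).
-- outside the precondition, e.g. on solution(5, 0, 3): A returns 1, B raises ZeroDivisionError; on solution(5, -2, 3): A returns 1, B returns -2
import Mathlib
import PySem

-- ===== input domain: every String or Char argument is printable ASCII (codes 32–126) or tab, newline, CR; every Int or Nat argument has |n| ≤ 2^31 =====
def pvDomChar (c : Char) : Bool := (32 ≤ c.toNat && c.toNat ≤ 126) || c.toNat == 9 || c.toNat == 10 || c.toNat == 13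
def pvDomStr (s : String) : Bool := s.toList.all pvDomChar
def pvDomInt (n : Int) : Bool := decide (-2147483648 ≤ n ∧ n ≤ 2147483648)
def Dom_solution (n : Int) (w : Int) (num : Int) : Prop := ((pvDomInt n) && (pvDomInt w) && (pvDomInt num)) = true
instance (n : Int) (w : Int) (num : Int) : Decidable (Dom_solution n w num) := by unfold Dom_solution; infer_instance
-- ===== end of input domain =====

-- B replaces A's O(n) simulation of the snake-ordered warehouse by O(1) arithmetic.

-- ===== PORT A =====
-- State and lists are kept cons-accumulated (reversed) with the lengths Python's O(1) len() reads
-- carried alongside, so the port evaluates in the same time bounds as the Python; the algorithm,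
-- loop structure and maintained values are A's.

-- `while len(stack) < w: stack.append(0)`  (stack held reversed, with its length)
def padTo (w : Int) (p : List Int × Int) : List Int × Int :=
  if h : p.2 < w then padTo w (0 :: p.1, p.2 + 1) else p
termination_by (w - p.2).toNat
decreasing_by omega

-- one iteration of A's building loop; state = (warehouse reversed, len(warehouse), stack reversed, len(stack))
def stepA (n w : Int) (st : List (List Int) × Int × List Int × Int) (i : Int) :
    List (List Int) × Int × List Int × Int :=
  let stk := i :: st.2.2.1
  let slen := st.2.2.2 + 1
  if slen = w ∨ i = n then
    let stk2 := if slen < w then (padTo w (stk, slen)).1 else stk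
    -- warehouse.append(stack[:]) on even rows, stack[::-1] on odd rows (stk2 is the reversed stack)
    let row := if st.2.1 % 2 = 0 then stk2.reverse else stk2
    (row :: st.1, st.2.1 + 1, [], 0)
  else (st.1, st.2.1, stk, slen)

-- `for row in range(len(warehouse)): if num in warehouse[row]: col = …; break`
-- (on a warehouse not containing num the Python leaves `col` unbound and raises NameError; excluded by Pre_)
def findLoop (rows : List (List Int)) (num : Int) (row : Nat) : Nat × Nat :=
  match rows with
  | [] => (row, 0)
  | r :: rest =>
    if num ∈ r then (row, (PySem.List.index? r num).getD 0)
    else findLoop rest num (row + 1)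

-- `for r in range(row, len(warehouse)): if warehouse[r][col] != 0: count += 1`
-- (structural fold over the rows from index `row` on)
def countLoop (rows : List (List Int)) (col : Nat) : Int :=
  rows.foldl (fun c r => if PySem.List.pyGetD r (col : Int) 0 ≠ 0 then c + 1 else c) 0

def solution (n : Int) (w : Int) (num : Int) : Int :=
  let st := (PySem.List.pyRange 1 (n + 1) 1).foldl (stepA n w) ([], 0, [], 0)
  let wh := st.1.reverse
  let rc := findLoop wh num 0
  countLoop (wh.drop rc.1) rc.2

-- ===== PORT B =====
def solution_alt (n : Int) (w : Int) (num : Int) : Int :=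
  -- Source B raises ValueError when num is not a box number (excluded by Pre_); 0 stands in for the raise
  if ¬ (1 ≤ num ∧ num ≤ n) then 0 else
  let row := PySem.Int.floordiv (num - 1) w
  let pos := PySem.Int.mod (num - 1) w
  let col := if PySem.Int.mod row 2 = 0 then pos else w - 1 - pos
  let full := PySem.Int.floordiv n w
  let rem := PySem.Int.mod n w
  let occ : Int :=
    if rem = 0 then 0
    else if PySem.Int.mod full 2 = 0 then (if col < rem then 1 else 0)
    else (if w - rem ≤ col then 1 else 0)
  full - row + occ

-- ===== PRECONDITION & SPEC =====
-- Pre_ restricts to the task's natural domain: a positive shelf width w and a box number that exists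
-- (1 ≤ num ≤ n).  For num outside 1..n (or n < 1) A raises NameError and B raises ValueError; for w ≤ 0
-- A degenerately returns a value (one unpadded row holding all the boxes) while B raises (w = 0) or
-- returns the formula's value (w < 0), so w ≤ 0 is excluded as outside the natural domain.
def Pre_solution (n : Int) (w : Int) (num : Int) : Prop := 1 ≤ w ∧ 1 ≤ num ∧ num ≤ n
instance (n : Int) (w : Int) (num : Int) : Decidable (Pre_solution n w num) := by unfold Pre_solution; infer_instance
def pvWitness_solution : Int × Int × Int := (10, 3, 7)

def Spec_solution (n : Int) (w : Int) (num : Int) (out : Int) : Prop := out = solution_alt n w num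
instance (n : Int) (w : Int) (num : Int) (out : Int) : Decidable (Spec_solution n w num out) := by unfold Spec_solution; infer_instance

-- ===== CLAIM (what is proved, stated in full; the proofs are below) =====
def Claim_equal_solution : Prop := ∀ (n : Int) (w : Int) (num : Int), Dom_solution n w num → Pre_solution n w num → Spec_solution n w num (solution n w num)

-- ===== LEMMAS AND PROOFS =====

-- The model: R rows, row q = rawRow q (left-to-right contents) oriented by parity of q.
def rawRow (n w : Int) (q : Nat) : List Int :=
  (List.range w.toNat).map (fun c : Nat => if (q : Int) * w + c + 1 ≤ n then (q : Int) * w + c + 1 else 0)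

def seg (w : Int) (q j : Nat) : List Int :=
  (List.range j).map (fun t : Nat => (q : Int) * w + t + 1)

def rowM (n w : Int) (q : Nat) : List Int :=
  if q % 2 = 0 then rawRow n w q else (rawRow n w q).reverse

def RR (n w : Int) : Nat := ((n + w - 1) / w).toNat

theorem padTo_spec (w : Int) : ∀ (l : Int) (s : List Int),
    (padTo w (s, l)).1 = List.replicate ((w - l).toNat) 0 ++ s := by
  intro l
  induction hfu : (w - l).toNat using Nat.strong_induction_on generalizing l with
  | _ fuel ihf =>
    intro s
    rw [padTo]
    split
    · rename_i h
      cases fuel with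
      | zero => omega
      | succ fuel =>
        rw [ihf fuel (by omega) (l + 1) (by simp only at h; omega) (0 :: s),
          List.replicate_succ', List.append_assoc]
        rfl
    · rename_i h
      simp only at h
      rw [show fuel = 0 from by omega]
      simp

theorem RR_last (n w : Int) (hw : 1 ≤ w) (q j : Nat) (hj : (j : Int) < w)
    (hn : n = (q : Int) * w + j + 1) : RR n w = q + 1 := by
  have h1 : n + w - 1 = (j : Int) + ((q : Int) + 1) * w := by ring_nf; linarith
  unfold RR
  rw [h1, Int.add_mul_ediv_right _ _ (by omega : w ≠ 0),
    Int.ediv_eq_zero_of_lt (by omega) hj]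
  omega

theorem RR_ge (n w : Int) (hw : 1 ≤ w) (q : Nat) (h : ((q : Int) + 1) * w + 1 ≤ n) :
    q + 1 ≤ RR n w := by
  have h2 : (q : Int) + 1 ≤ (n + w - 1) / w := by
    rw [Int.le_ediv_iff_mul_le (by omega)]
    linarith
  unfold RR
  omega

theorem flush_row (n w : Int) (hw : 1 ≤ w) (q j : Nat) (hj : (j : Int) < w)
    (hle : (q : Int) * w + j + 1 ≤ n)
    (hC : ((j : Int) + 1 = w) ∨ n = (q : Int) * w + j + 1) :
    seg w q (j + 1) ++ List.replicate ((w - ((j : Int) + 1)).toNat) 0 = rawRow n w q := by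
  unfold rawRow seg
  conv_rhs => rw [show w.toNat = (j + 1) + (w - ((j : Int) + 1)).toNat from by omega,
    List.range_add, List.map_append, List.map_map]
  congr 1
  · apply List.map_congr_left
    intro t ht
    rw [List.mem_range, Nat.lt_succ_iff] at ht
    have ht' : (t : Int) ≤ j := by exact_mod_cast ht
    rw [if_pos (by linarith)]
  · rcases Nat.eq_zero_or_pos ((w - ((j : Int) + 1)).toNat) with hd | hd
    · rw [hd]; simp
    · have hn : n = (q : Int) * w + j + 1 := by
        rcases hC with h | h
        · omega
        · exact h
      symm
      apply List.eq_replicate_iff.mpr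
      refine ⟨by simp, ?_⟩
      intro b hb
      simp only [List.mem_map, List.mem_range, Function.comp] at hb
      obtain ⟨t, _, hbe⟩ := hb
      rw [if_neg (by push_cast; omega)] at hbe
      exact hbe.symm

theorem build_inv (n w : Int) (hw : 1 ≤ w) :
    ∀ (fuel : Nat) (i : Int) (W : List (List Int)) (j : Nat),
      (n + 1 - i).toNat = fuel → i ≤ n →
      i = (W.length : Int) * w + (j : Int) + 1 → (j : Int) < w →
      ((PySem.List.pyRange i (n + 1) 1).foldl (stepA n w)
          (W, (W.length : Int), (seg w W.length j).reverse, (j : Int))).1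
        = ((List.range' W.length (RR n w - W.length)).map (rowM n w)).reverse ++ W := by
  intro fuel
  induction fuel with
  | zero => intro i W j hf hi _ _; omega
  | succ fuel ih =>
    intro i W j hf hi hiW hj
    rw [PySem.List.pyRange_one_cons (by omega : i < n + 1), List.foldl_cons]
    have hstack : i :: (seg w W.length j).reverse = (seg w W.length (j + 1)).reverse := by
      unfold seg
      rw [List.range_succ, List.map_append, List.map_singleton, List.reverse_append]
      simp only [List.reverse_singleton, List.singleton_append, List.cons.injEq, and_true]
      linarith [hiW]
    by_cases hC : ((j : Int) + 1 = w ∨ i = n)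
    · -- flush: one full/last row is appended
      have hstep : stepA n w (W, (W.length : Int), (seg w W.length j).reverse, (j : Int)) i
          = (rowM n w W.length :: W, (W.length : Int) + 1, [], 0) := by
        simp only [stepA, hstack]
        rw [if_pos hC]
        have hpad : (if (j : Int) + 1 < w
              then (padTo w ((seg w W.length (j + 1)).reverse, (j : Int) + 1)).1
              else (seg w W.length (j + 1)).reverse)
            = (rawRow n w W.length).reverse := by
          have hflush := flush_row n w hw W.length j hj (by linarith [hiW]) (by
            rcases hC with h | h
            · left; exact h
            · right; rw [← h]; exact hiW)
          rw [← hflush, List.reverse_append, List.reverse_replicate]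
          split
          · rw [padTo_spec]
          · rw [show ((w - ((j : Int) + 1)).toNat) = 0 from by omega]
            simp
        rw [hpad]
        unfold rowM
        by_cases hp2 : W.length % 2 = 0
        · rw [if_pos (show ((W.length : Int)) % 2 = 0 from by omega), if_pos hp2,
            List.reverse_reverse]
        · rw [if_neg (show ¬ ((W.length : Int)) % 2 = 0 from by omega), if_neg hp2]
      rw [hstep]
      by_cases hin : i = n
      · have hempty : PySem.List.pyRange (i + 1) (n + 1) 1 = [] := by
          rw [PySem.List.pyRange_one]
          rw [show (n + 1 - (i + 1)).toNat = 0 from by omega, List.range_zero, List.map_nil]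
        rw [hempty, List.foldl_nil]
        have hRR : RR n w = W.length + 1 := RR_last n w hw W.length j hj (by omega)
        rw [hRR]
        simp [List.range'_one]
      · have hjw : (j : Int) + 1 = w := hC.resolve_right hin
        have hstep2 := ih (i + 1) (rowM n w W.length :: W) 0 (by omega) (by omega)
          (by
            simp only [List.length_cons]
            push_cast
            have hx : ((W.length : Int)) * w + w = ((W.length : Int) + 1) * w := by ring
            have hlt : i + 1 ≤ n := by omega
            linarith [hiW, hjw, hx, hlt])
          (by omega)
        simp only [seg, List.range_zero, List.map_nil, List.reverse_nil, Nat.cast_zero,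
          List.length_cons] at hstep2
        rw [show ((W.length : Int) + 1) = ((W.length + 1 : Nat) : Int) from by push_cast; ring,
          hstep2]
        have hge : W.length + 1 ≤ RR n w := by
          apply RR_ge n w hw
          have hx : ((W.length : Int)) * w + w = ((W.length : Int) + 1) * w := by ring
          have hlt : i + 1 ≤ n := by omega
          nlinarith [hiW, hjw, hlt]
        rw [show RR n w - W.length = (RR n w - (W.length + 1)) + 1 from by omega,
          List.range'_succ, List.map_cons, List.reverse_cons, List.append_assoc]
        rfl
    · -- no flush: keep accumulating the stack
      rw [not_or] at hC
      have hstep : stepA n w (W, (W.length : Int), (seg w W.length j).reverse, (j : Int)) i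
          = (W, (W.length : Int), (seg w W.length (j + 1)).reverse, (j : Int) + 1) := by
        simp only [stepA, hstack]
        rw [if_neg (by rw [not_or]; exact hC)]
      rw [hstep, show ((j : Int) + 1) = ((j + 1 : Nat) : Int) from by push_cast; ring]
      exact ih (i + 1) W (j + 1) (by omega) (by omega) (by push_cast; linarith [hiW])
        (by push_cast at hC ⊢; omega)

theorem build_eq (n w : Int) (hw : 1 ≤ w) (hn : 1 ≤ n) :
    ((PySem.List.pyRange 1 (n + 1) 1).foldl (stepA n w) ([], 0, [], 0)).1.reverse
      = (List.range (RR n w)).map (rowM n w) := by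
  have h := build_inv n w hw (n + 1 - 1).toNat 1 [] 0 rfl hn (by simp) (by omega)
  simp only [seg, List.range_zero, List.map_nil, List.reverse_nil, List.length_nil,
    Nat.cast_zero, Nat.sub_zero, List.append_nil] at h
  rw [h, List.reverse_reverse, List.range_eq_range']

-- first index k with l[k] = v (used for `list.index`)
theorem index?_first (v : Int) : ∀ (l : List Int) (k : Nat), l[k]? = some v →
    (∀ j, j < k → l[j]? ≠ some v) → PySem.List.index? l v = some k := by
  intro l
  induction l with
  | nil => intro k hk; simp at hk
  | cons x xs ihl =>
    intro k hk hprev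
    cases k with
    | zero =>
      simp only [List.getElem?_cons_zero, Option.some.injEq] at hk
      rw [hk]
      exact PySem.List.index?_cons_self v xs
    | succ k =>
      have hx : x ≠ v := by
        have h0 := hprev 0 (Nat.succ_pos k)
        simpa using h0
      rw [PySem.List.index?_cons_of_ne xs hx,
        ihl k (by simpa using hk) (fun j hj => by
          have := hprev (j + 1) (by omega)
          simpa using this)]
      rfl

theorem mem_rawRow_iff (n w : Int) (num : Int) (h1 : 1 ≤ num) (q : Nat) :
    num ∈ rawRow n w q ↔ (q : Int) * w < num ∧ num ≤ (q : Int) * w + w ∧ num ≤ n := by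
  unfold rawRow
  simp only [List.mem_map, List.mem_range]
  generalize (q : Int) * w = b
  constructor
  · rintro ⟨c, hc, hce⟩
    split at hce <;> omega
  · intro hb3
    exact ⟨(num - b - 1).toNat, by omega, by rw [if_pos (by omega)]; omega⟩

theorem mem_rowM_iff (n w : Int) (num : Int) (h1 : 1 ≤ num) (q : Nat) :
    num ∈ rowM n w q ↔ (q : Int) * w < num ∧ num ≤ (q : Int) * w + w ∧ num ≤ n := by
  unfold rowM
  split
  · exact mem_rawRow_iff n w num h1 q
  · rw [List.mem_reverse]
    exact mem_rawRow_iff n w num h1 q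

theorem index?_rawRow (n w : Int) (num : Int) (q : Nat)
    (hlow : (q : Int) * w < num) (hhigh : num ≤ (q : Int) * w + w) (hn : num ≤ n) :
    PySem.List.index? (rawRow n w q) num = some ((num - 1 - (q : Int) * w).toNat) := by
  unfold rawRow
  generalize hb : (q : Int) * w = b at *
  apply index?_first
  · rw [List.getElem?_map, List.getElem?_range (by omega)]
    simp only [Option.map_some, Option.some.injEq]
    rw [if_pos (by omega)]
    omega
  · intro j hj
    rw [List.getElem?_map, List.getElem?_range (by omega)]
    simp only [Option.map_some, ne_eq, Option.some.injEq]
    split <;> omega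

theorem index?_rawRow_rev (n w : Int) (hw : 1 ≤ w) (num : Int) (h1 : 1 ≤ num) (q : Nat)
    (hlow : (q : Int) * w < num) (hhigh : num ≤ (q : Int) * w + w) (hn : num ≤ n) :
    PySem.List.index? (rawRow n w q).reverse num
      = some (w.toNat - 1 - (num - 1 - (q : Int) * w).toNat) := by
  unfold rawRow
  generalize hb : (q : Int) * w = b at *
  apply index?_first
  · rw [List.getElem?_reverse (by simp only [List.length_map, List.length_range]; omega)]
    simp only [List.length_map, List.length_range]
    rw [List.getElem?_map, List.getElem?_range (by omega)]
    simp only [Option.map_some, Option.some.injEq]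
    rw [show w.toNat - 1 - (w.toNat - 1 - (num - 1 - b).toNat) = (num - 1 - b).toNat from by omega]
    rw [if_pos (by omega)]
    omega
  · intro j hj
    rw [List.getElem?_reverse (by simp only [List.length_map, List.length_range]; omega)]
    simp only [List.length_map, List.length_range]
    rw [List.getElem?_map, List.getElem?_range (by omega)]
    simp only [Option.map_some, ne_eq, Option.some.injEq]
    split <;> omega

theorem find_aux (n w num : Int) (hw : 1 ≤ w) (h1 : 1 ≤ num) (hn : num ≤ n)
    (rid : Nat) (hlow : (rid : Int) * w < num) (hhigh : num ≤ (rid : Int) * w + w) :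
    ∀ (k a : Nat), a ≤ rid → rid < a + k →
      findLoop ((List.range' a k).map (rowM n w)) num a
        = (rid, if rid % 2 = 0 then (num - 1 - (rid : Int) * w).toNat
                else w.toNat - 1 - (num - 1 - (rid : Int) * w).toNat) := by
  intro k
  induction k with
  | zero => intro a h1' h2'; omega
  | succ k ihk =>
    intro a ha hak
    rw [List.range'_succ, List.map_cons]
    simp only [findLoop]
    by_cases hmem : num ∈ rowM n w a
    · rw [if_pos hmem]
      have hb := (mem_rowM_iff n w num h1 a).mp hmem
      have haeq : a = rid := by
        rcases Nat.lt_trichotomy a rid with hlt | heq | hgt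
        · exfalso
          have hc : ((a : Int) + 1) * w ≤ (rid : Int) * w := by
            apply mul_le_mul_of_nonneg_right _ (by omega)
            exact_mod_cast hlt
          nlinarith [hb.2.1, hlow, hc]
        · exact heq
        · exfalso
          have hc : ((rid : Int) + 1) * w ≤ (a : Int) * w := by
            apply mul_le_mul_of_nonneg_right _ (by omega)
            exact_mod_cast hgt
          nlinarith [hb.1, hhigh, hc]
      subst haeq
      unfold rowM
      split
      · rw [index?_rawRow n w num a hlow hhigh hn]
        rfl
      · rw [index?_rawRow_rev n w hw num h1 a hlow hhigh hn]
        rfl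
    · rw [if_neg hmem]
      have hane : a ≠ rid := by
        intro he
        exact hmem (he ▸ (mem_rowM_iff n w num h1 rid).mpr ⟨hlow, hhigh, hn⟩)
      exact ihk (a + 1) (by omega) (by omega)

theorem RR_ge' (n w : Int) (hw : 1 ≤ w) (q : Nat) (h : (q : Int) * w + 1 ≤ n) :
    q + 1 ≤ RR n w := by
  have h2 : (q : Int) + 1 ≤ (n + w - 1) / w := by
    rw [Int.le_ediv_iff_mul_le (by omega)]
    nlinarith
  unfold RR
  omega

theorem RR_char (n w : Int) (hw : 1 ≤ w) (hn : 1 ≤ n) :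
    (RR n w : Int) = if n % w = 0 then n / w else n / w + 1 := by
  have h0 := Int.ediv_add_emod n w
  have hm0 : 0 ≤ n % w := Int.emod_nonneg n (by omega)
  have hmw : n % w < w := Int.emod_lt_of_pos n (by omega)
  have hq0 : 0 ≤ n / w := Int.ediv_nonneg (by omega) (by omega)
  unfold RR
  have hsplit : n + w - 1 = (n % w + w - 1) + (n / w) * w := by linarith
  rw [hsplit, Int.add_mul_ediv_right _ _ (by omega : w ≠ 0)]
  by_cases h : n % w = 0
  · rw [if_pos h, h, Int.ediv_eq_zero_of_lt (by omega) (by omega)]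
    omega
  · rw [if_neg h]
    have : n % w + w - 1 = (n % w - 1) + 1 * w := by ring
    rw [this, Int.add_mul_ediv_right _ _ (by omega : w ≠ 0),
      Int.ediv_eq_zero_of_lt (by omega) (by omega)]
    omega

-- the cell of the model at row r, column c
def cellV (n w : Int) (r c : Nat) : Int :=
  if (r : Int) * w + (if r % 2 = 0 then (c : Int) else w - 1 - (c : Int)) + 1 ≤ n
  then (r : Int) * w + (if r % 2 = 0 then (c : Int) else w - 1 - (c : Int)) + 1 else 0

theorem row_eval (n w : Int) (hw : 1 ≤ w) (r c : Nat) (hc : c < w.toNat) :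
    PySem.List.pyGetD (rowM n w r) ((c : Nat) : Int) 0 = cellV n w r c := by
  rw [PySem.List.pyGetD_natCast]
  unfold rowM cellV
  split
  · rw [List.getD_eq_getElem?_getD]
    simp only [rawRow]
    rw [List.getElem?_map, List.getElem?_range (by omega)]
    simp only [Option.map_some, Option.getD_some]
  · rw [List.getD_eq_getElem?_getD,
      List.getElem?_reverse (by simp only [rawRow, List.length_map, List.length_range]; omega)]
    simp only [rawRow, List.length_map, List.length_range]
    rw [List.getElem?_map, List.getElem?_range (by omega)]
    simp only [Option.map_some, Option.getD_some]
    rw [show ((w.toNat - 1 - c : Nat) : Int) = w - 1 - (c : Int) from by omega]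

theorem sum_ones (f : Nat → Int) : ∀ (m : Nat), (∀ t, t < m → f t = 1) →
    ((List.range m).map f).sum = m := by
  intro m
  induction m with
  | zero => intro _; simp
  | succ m ihm =>
    intro hf
    rw [List.range_succ, List.map_append, List.sum_append, ihm (fun t ht => hf t (by omega))]
    simp [hf m (by omega)]

set_option maxHeartbeats 2000000 in
theorem final (n w num : Int) (hw : 1 ≤ w) (h1 : 1 ≤ num) (h2 : num ≤ n) :
    solution n w num = solution_alt n w num := by
  have hn1 : 1 ≤ n := le_trans h1 h2
  have hw0 : w ≠ 0 := by omega
  have hwpos : (0 : Int) < w := by omega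
  -- row/position arithmetic for num
  have hdm : w * ((num - 1) / w) + (num - 1) % w = num - 1 := Int.ediv_add_emod (num - 1) w
  have hcm : w * ((num - 1) / w) = ((num - 1) / w) * w := mul_comm _ _
  have hm0 : 0 ≤ (num - 1) % w := Int.emod_nonneg _ hw0
  have hmw : (num - 1) % w < w := Int.emod_lt_of_pos _ hwpos
  have hq0 : 0 ≤ (num - 1) / w := Int.ediv_nonneg (by omega) (by omega)
  set rid : Nat := ((num - 1) / w).toNat with hrid_def
  have hridc : (rid : Int) = (num - 1) / w := Int.toNat_of_nonneg hq0
  set posN : Nat := ((num - 1) % w).toNat with hpos_def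
  have hposc : (posN : Int) = (num - 1) % w := Int.toNat_of_nonneg hm0
  have hposw : posN < w.toNat := by omega
  have hlow : (rid : Int) * w < num := by rw [hridc]; linarith
  have hhigh : num ≤ (rid : Int) * w + w := by rw [hridc]; linarith
  -- full rows / remainder for n
  have hnd : w * (n / w) + n % w = n := Int.ediv_add_emod n w
  have hncm : w * (n / w) = (n / w) * w := mul_comm _ _
  have hr0 : 0 ≤ n % w := Int.emod_nonneg _ hw0
  have hrw : n % w < w := Int.emod_lt_of_pos _ hwpos
  have hf0 : 0 ≤ n / w := Int.ediv_nonneg (by omega) (by omega)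
  set fullN : Nat := (n / w).toNat with hfull_def
  have hfullc : (fullN : Int) = n / w := Int.toNat_of_nonneg hf0
  have hrid_le : (rid : Int) ≤ (fullN : Int) := by
    rw [hridc, hfullc]
    exact Int.ediv_le_ediv hwpos (by omega)
  -- the find loop returns (rid, cid)
  have hRRge : rid + 1 ≤ RR n w := RR_ge' n w hw rid (by linarith)
  have hfind := find_aux n w num hw h1 h2 rid hlow hhigh (RR n w) 0 (by omega) (by omega)
  rw [← List.range_eq_range'] at hfind
  have hpp : (num - 1 - (rid : Int) * w).toNat = posN := by
    have : num - 1 - (rid : Int) * w = (num - 1) % w := by rw [hridc]; linarith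
    rw [this]
  rw [hpp] at hfind
  set cid : Nat := if rid % 2 = 0 then posN else w.toNat - 1 - posN with hcid_def
  have hcw : cid < w.toNat := by rw [hcid_def]; split <;> omega
  -- evaluate A
  simp only [solution]
  rw [build_eq n w hw hn1, hfind]
  set K : Nat := RR n w - rid with hK_def
  have hdrop : ((List.range (RR n w)).map (rowM n w)).drop rid
      = (List.range' rid K).map (rowM n w) := by
    rw [List.range_eq_range', ← List.map_drop, List.drop_range']
    simp [hK_def]
  unfold countLoop
  rw [hdrop]
  have hfun : (fun (c : Int) (r : List Int) =>
        if PySem.List.pyGetD r ((cid : Nat) : Int) 0 ≠ 0 then c + 1 else c)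
      = (fun (c : Int) (r : List Int) =>
          c + (if PySem.List.pyGetD r ((cid : Nat) : Int) 0 ≠ 0 then (1 : Int) else 0)) := by
    funext c r
    split <;> ring
  rw [hfun, PySem.List.foldl_add, zero_add, List.map_map, List.range'_eq_map_range,
    List.map_map]
  -- per-element value
  have helem : ∀ t, t < K →
      (((fun r : List Int => if PySem.List.pyGetD r ((cid : Nat) : Int) 0 ≠ 0 then (1 : Int) else 0)
          ∘ rowM n w) ∘ fun x => rid + x) t
        = (if ((rid + t : Nat) : Int) * w
              + (if (rid + t) % 2 = 0 then (cid : Int) else w - 1 - (cid : Int)) + 1 ≤ n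
           then (1 : Int) else 0) := by
    intro t ht
    simp only [Function.comp]
    rw [row_eval n w hw (rid + t) cid hcw]
    unfold cellV
    have hp0 : 0 ≤ (if (rid + t) % 2 = 0 then (cid : Int) else w - 1 - (cid : Int)) := by
      split <;> omega
    have hrw0 : 0 ≤ ((rid + t : Nat) : Int) * w := mul_nonneg (by omega) (by omega)
    by_cases hcc : ((rid + t : Nat) : Int) * w
        + (if (rid + t) % 2 = 0 then (cid : Int) else w - 1 - (cid : Int)) + 1 ≤ n
    · rw [if_pos hcc, if_pos hcc,
        if_pos (show ((rid + t : Nat) : Int) * w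
          + (if (rid + t) % 2 = 0 then (cid : Int) else w - 1 - (cid : Int)) + 1 ≠ 0 from by
            intro h0; linarith [hp0, hrw0])]
    · rw [if_neg hcc, if_neg hcc, if_neg (by simp)]
  rw [List.map_congr_left (fun t ht => helem t (List.mem_range.mp ht))]
  -- evaluate B
  rw [show solution_alt n w num = (let row := PySem.Int.floordiv (num - 1) w
    let pos := PySem.Int.mod (num - 1) w
    let col := if PySem.Int.mod row 2 = 0 then pos else w - 1 - pos
    let full := PySem.Int.floordiv n w
    let rem := PySem.Int.mod n w
    let occ : Int :=
      if rem = 0 then 0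
      else if PySem.Int.mod full 2 = 0 then (if col < rem then 1 else 0)
      else (if w - rem ≤ col then 1 else 0)
    full - row + occ) from by
    unfold solution_alt
    rw [if_neg (by omega)]]
  have hfd : ∀ a : Int, PySem.Int.floordiv a w = a / w :=
    fun a => PySem.Int.floordiv_eq_ediv_of_pos hwpos
  have hmd : ∀ a : Int, PySem.Int.mod a w = a % w :=
    fun a => PySem.Int.mod_eq_emod_of_pos hwpos
  have hmd2 : ∀ a : Int, PySem.Int.mod a 2 = a % 2 :=
    fun a => PySem.Int.mod_eq_emod_of_pos (by norm_num)
  simp only [hfd, hmd, hmd2]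
  -- B's col equals cid
  have hpar : (num - 1) / w % 2 = 0 ↔ rid % 2 = 0 := by
    rw [← hridc]
    omega
  have hcidc : (cid : Int) = (if (num - 1) / w % 2 = 0 then (num - 1) % w
      else w - 1 - (num - 1) % w) := by
    rw [hcid_def]
    by_cases hpe : rid % 2 = 0
    · rw [if_pos hpe, if_pos (hpar.mpr hpe), hposc]
    · rw [if_neg hpe, if_neg (fun hc => hpe (hpar.mp hc))]
      omega
  -- row-product monotonicity helper
  have hmono : ∀ rA rB : Int, rA ≤ rB → rA * w ≤ rB * w :=
    fun rA rB h => mul_le_mul_of_nonneg_right h (by omega)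
  by_cases hrem : n % w = 0
  · -- no partial row
    have hRR : ((RR n w : Nat) : Int) = n / w := by
      rw [RR_char n w hw hn1, if_pos hrem]
    rw [if_pos hrem]
    have hsum := sum_ones (fun t => (if ((rid + t : Nat) : Int) * w
        + (if (rid + t) % 2 = 0 then (cid : Int) else w - 1 - (cid : Int)) + 1 ≤ n
        then (1 : Int) else 0)) K (by
      intro t ht
      simp only []
      rw [if_pos]
      have h1' : ((rid + t : Nat) : Int) + 1 ≤ (fullN : Int) := by omega
      have h2' : (((rid + t : Nat) : Int) + 1) * w ≤ (fullN : Int) * w := hmono _ _ h1'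
      have hpw : (if (rid + t) % 2 = 0 then (cid : Int) else w - 1 - (cid : Int)) ≤ w - 1 := by
        split <;> omega
      nlinarith [hfullc, hnd, hncm])
    rw [hsum]
    have : ((K : Nat) : Int) = ((RR n w : Nat) : Int) - (rid : Int) := by omega
    rw [this, hRR, hridc]
    ring
  · -- one partial row at index fullN
    have hRR : ((RR n w : Nat) : Int) = n / w + 1 := by
      rw [RR_char n w hw hn1, if_neg hrem]
    rw [if_neg hrem]
    have hKpos : 1 ≤ K := by omega
    have hKsplit : K = (K - 1) + 1 := by omega
    rw [hKsplit, List.range_succ, List.map_append, List.sum_append]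
    have hsum := sum_ones (fun t => (if ((rid + t : Nat) : Int) * w
        + (if (rid + t) % 2 = 0 then (cid : Int) else w - 1 - (cid : Int)) + 1 ≤ n
        then (1 : Int) else 0)) (K - 1) (by
      intro t ht
      simp only []
      rw [if_pos]
      have h1' : ((rid + t : Nat) : Int) + 1 ≤ (fullN : Int) := by omega
      have h2' : (((rid + t : Nat) : Int) + 1) * w ≤ (fullN : Int) * w := hmono _ _ h1'
      have hpw : (if (rid + t) % 2 = 0 then (cid : Int) else w - 1 - (cid : Int)) ≤ w - 1 := by
        split <;> omega
      nlinarith [hfullc, hnd, hncm])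
    rw [hsum]
    -- the last row is row fullN
    have hlast : rid + (K - 1) = fullN := by omega
    simp only [List.map_cons, List.map_nil, List.sum_cons, List.sum_nil, add_zero]
    rw [hlast]
    rw [← hcidc, ← hfullc, ← hridc]
    have hval : (fullN : Int) * w = n - n % w := by
      have hx := congrArg (fun x : Int => x * w) hfullc
      simp only [] at hx
      linarith [hx, hncm, hnd]
    have hRRf : ((RR n w : Nat) : Int) = (fullN : Int) + 1 := by rw [hRR, ← hfullc]
    have hK1 : ((K - 1 : Nat) : Int) = (fullN : Int) - (rid : Int) := by omega
    rw [hK1]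
    by_cases hfe : fullN % 2 = 0
    · have hfe' : ((fullN : Nat) : Int) % 2 = 0 := by omega
      rw [if_pos hfe', if_pos hfe]
      by_cases hocc : (cid : Int) < n % w
      · rw [if_pos (by linarith [hval] :
            (fullN : Int) * w + (cid : Int) + 1 ≤ n), if_pos hocc]
      · rw [if_neg (fun hA => hocc (by linarith [hval])), if_neg hocc]
    · have hfe' : ¬ ((fullN : Nat) : Int) % 2 = 0 := by omega
      rw [if_neg hfe', if_neg hfe]
      by_cases hocc : w - n % w ≤ (cid : Int)
      · rw [if_pos (by linarith [hval] :
            (fullN : Int) * w + (w - 1 - (cid : Int)) + 1 ≤ n), if_pos hocc]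
      · rw [if_neg (fun hA => hocc (by linarith [hval])), if_neg hocc]

-- ===== VERDICT (by name: the statement is the Claim_ definition above) =====
theorem solution_spec : Claim_equal_solution := by
  intro n w num _ hpre
  unfold Spec_solution
  exact final n w num hpre.1 hpre.2.1 hpre.2.2
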